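-- pv_equiv track=rewrite | github.com/manishjnv/AIExpert | backend/tests/test_blog_validator.py | _filler_paragraph
-- ===== SOURCE A (Python) =====
-- def _filler_paragraph(idx: int, extra_words: int = 120) -> str:
--     """Generate a deterministic ~extra_words-word paragraph. Uses a seeded
--     vocabulary so tests stay stable across runs."""
--     lex = ("learning models fundamentals principles practice dataset training "
--            "evaluation deployment architecture gradient optimization loss "
--            "function inference production engineering role skills career "
--            "growth demand market salary compensation education background "
--            "degree bootcamp portfolio project measured outcomes stakeholders "
--            "business context teams reliability observability scaling").split()
--     words = []
--     for i in range(extra_words):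
--         words.append(lex[(idx * 7 + i) % len(lex)])
--     return "<p>" + " ".join(words).capitalize() + ".</p>"
-- ===== SOURCE B (Python) =====
-- def _filler_paragraph(idx: int, extra_words: int = 120) -> str:
--     """Rotate-and-tile re-implementation: compute the start offset once, rotate
--     the vocabulary, then tile the rotated list and slice, instead of per-word
--     modular indexing."""
--     lex = ("learning models fundamentals principles practice dataset training "
--            "evaluation deployment architecture gradient optimization loss "
--            "function inference production engineering role skills career "
--            "growth demand market salary compensation education background "
--            "degree bootcamp portfolio project measured outcomes stakeholders "
--            "business context teams reliability observability scaling").split()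
--     n = max(extra_words, 0)
--     start = (idx * 7) % len(lex)
--     rot = lex[start:] + lex[:start]
--     reps = -(-n // len(rot))  # ceiling division: enough full copies
--     words = (rot * reps)[:n]
--     return "<p>" + " ".join(words).capitalize() + ".</p>"
-- ===== Notes on version B (the rewrite author's own statement) =====
-- stated objective: alternative
-- what changed: B computes the start offset (idx*7)%len(lex) once, rotates the vocabulary, and builds the word list by tiling the rotated list (list repetition with ceiling-division count) plus one slice, instead of A's per-word modular indexing lex[(idx*7+i)%len(lex)] inside the loop.
import Mathlib
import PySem

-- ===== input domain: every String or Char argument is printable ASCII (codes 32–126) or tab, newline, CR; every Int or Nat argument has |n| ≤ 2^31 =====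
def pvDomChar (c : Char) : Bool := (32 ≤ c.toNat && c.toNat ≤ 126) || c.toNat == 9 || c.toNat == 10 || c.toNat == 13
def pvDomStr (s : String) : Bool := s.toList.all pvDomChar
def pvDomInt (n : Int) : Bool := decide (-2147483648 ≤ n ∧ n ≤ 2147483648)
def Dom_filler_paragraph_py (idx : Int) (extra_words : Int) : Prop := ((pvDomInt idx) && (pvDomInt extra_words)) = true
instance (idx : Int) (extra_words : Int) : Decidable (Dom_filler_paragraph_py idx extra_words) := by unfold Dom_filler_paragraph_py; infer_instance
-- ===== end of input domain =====

-- B replaces the per-word modular indexing lex[(idx*7+i)%L] by computing the start offset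
-- once, rotating the vocabulary, and tiling-then-slicing the rotated list (objective:
-- alternative decomposition; identical output).

-- ===== PORT A =====
-- the seeded vocabulary, as Python's .split() produces it
def fillerLex : List String :=
  ["learning", "models", "fundamentals", "principles", "practice", "dataset", "training",
   "evaluation", "deployment", "architecture", "gradient", "optimization", "loss",
   "function", "inference", "production", "engineering", "role", "skills", "career",
   "growth", "demand", "market", "salary", "compensation", "education", "background",
   "degree", "bootcamp", "portfolio", "project", "measured", "outcomes", "stakeholders",
   "business", "context", "teams", "reliability", "observability", "scaling"]

-- str.capitalize(): first char upper-cased, the rest lowered (exact on the ASCII domain)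
def pyCapitalize : List Char → List Char
  | [] => []
  | c :: cs => PySem.Chars.upperChar c :: cs.map PySem.Chars.lowerChar

def filler_paragraph_py (idx : Int) (extra_words : Int) : String :=
  let lex := fillerLex
  let words := (PySem.List.pyRange 0 extra_words 1).foldl
      (fun ws i => ws ++ [PySem.List.pyGetD lex (PySem.Int.mod (idx * 7 + i) (lex.length : Int)) ""]) []
  "<p>" ++ String.ofList (pyCapitalize (PySem.Str.join " " words).toList) ++ ".</p>"

-- ===== PORT B =====
def filler_paragraph_py_alt (idx : Int) (extra_words : Int) : String :=
  let lex := fillerLex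
  let n : Int := max extra_words 0
  let start := PySem.Int.mod (idx * 7) (lex.length : Int)
  let rot := PySem.List.slice lex (some start) none ++ PySem.List.slice lex none (some start)
  let reps := -(PySem.Int.floordiv (-n) (rot.length : Int))  -- ceiling division
  let words := PySem.List.slice ((List.replicate reps.toNat rot).flatten) none (some n)
  "<p>" ++ String.ofList (pyCapitalize (PySem.Str.join " " words).toList) ++ ".</p>"

-- ===== PRECONDITION & SPEC =====
def Spec_filler_paragraph_py (idx : Int) (extra_words : Int) (out : String) : Prop := out = filler_paragraph_py_alt idx extra_words
instance (idx : Int) (extra_words : Int) (out : String) : Decidable (Spec_filler_paragraph_py idx extra_words out) := by unfold Spec_filler_paragraph_py; infer_instance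

-- ===== CLAIM (what is proved, stated in full; the proofs are below) =====
def Claim_equal_filler_paragraph_py : Prop := ∀ (idx : Int) (extra_words : Int), Dom_filler_paragraph_py idx extra_words → Spec_filler_paragraph_py idx extra_words (filler_paragraph_py idx extra_words)

-- ===== LEMMAS AND PROOFS =====

-- the paragraph assembly only depends on the word list
theorem assemble_congr (w1 w2 : List String) (h : w1 = w2) :
    "<p>" ++ String.ofList (pyCapitalize (PySem.Str.join " " w1).toList) ++ ".</p>"
      = "<p>" ++ String.ofList (pyCapitalize (PySem.Str.join " " w2).toList) ++ ".</p>" := by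
  rw [h]

-- a rotated list read cyclically is the original list read cyclically from the offset
theorem rot_getD (l : List String) (m j : Nat) (hm : m < l.length) :
    (l.drop m ++ l.take m).getD (j % l.length) "" = l.getD ((m + j) % l.length) "" := by
  have hL : 0 < l.length := Nat.lt_of_le_of_lt (Nat.zero_le m) hm
  have hj : j % l.length < l.length := Nat.mod_lt _ hL
  have hmj : (m + j) % l.length = (m + j % l.length) % l.length := by
    rw [Nat.add_mod m j, Nat.mod_eq_of_lt hm]
  rw [hmj]
  set j' := j % l.length with hj'
  have hdl : (l.drop m).length = l.length - m := by simp
  rw [List.getD_eq_getElem?_getD, List.getD_eq_getElem?_getD]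
  rcases Nat.lt_or_ge j' (l.length - m) with h | h
  · have h1 : m + j' < l.length := by omega
    rw [Nat.mod_eq_of_lt h1, List.getElem?_append_left (by rw [hdl]; omega),
        List.getElem?_drop]
  · have h1 : (m + j') % l.length = m + j' - l.length := by
      rw [Nat.mod_eq_sub_mod (by omega), Nat.mod_eq_of_lt (by omega)]
    have hge : (l.drop m).length ≤ j' := by rw [hdl]; omega
    have hlt2 : j' - (l.drop m).length < m := by rw [hdl]; omega
    have hidx : j' - (l.drop m).length = m + j' - l.length := by rw [hdl]; omega
    rw [h1, List.getElem?_append_right hge, List.getElem?_take_of_lt hlt2, hidx]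

-- getElem? of a tiled list is cyclic
theorem flat_replicate_getElem? (l : List String) (k i : Nat) (h : i < k * l.length) :
    ((List.replicate k l).flatten)[i]? = l[i % l.length]? := by
  induction k generalizing i with
  | zero => omega
  | succ k ih =>
    rw [List.replicate_succ, List.flatten_cons]
    rcases Nat.lt_or_ge i l.length with hi | hi
    · rw [List.getElem?_append_left hi, Nat.mod_eq_of_lt hi]
    · rw [List.getElem?_append_right hi,
          ih (i - l.length) (by
            have hs : (k + 1) * l.length = k * l.length + l.length := by ring
            omega),
          Nat.mod_eq_sub_mod hi]

-- tiling the list k times and truncating to n words = reading it cyclically n times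
theorem tile_take (l : List String) (k n : Nat) (h : n ≤ k * l.length) :
    ((List.replicate k l).flatten).take n = (List.range n).map (fun i => l.getD (i % l.length) "") := by
  have hlen : ((List.replicate k l).flatten).length = k * l.length := by
    simp [List.length_flatten]
  apply List.ext_getElem?
  intro i
  rcases Nat.lt_or_ge i n with hi | hi
  · have hL0 : 0 < l.length := by
      rcases Nat.eq_zero_or_pos l.length with h0 | h0
      · rw [h0, Nat.mul_zero] at h; omega
      · exact h0
    rw [List.getElem?_take_of_lt hi, flat_replicate_getElem? l k i (by omega),
        List.getElem?_map, List.getElem?_range hi]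
    have hil : i % l.length < l.length := Nat.mod_lt _ hL0
    simp [List.getD_eq_getElem?_getD, List.getElem?_eq_getElem hil]
  · rw [List.getElem?_eq_none (by rw [List.length_take, hlen]; omega),
        List.getElem?_eq_none (by rw [List.length_map, List.length_range]; omega)]

-- ===== VERDICT (by name: the statement is the Claim_ definition above) =====
theorem filler_paragraph_py_spec : Claim_equal_filler_paragraph_py := by
  intro idx extra_words _
  unfold Spec_filler_paragraph_py
  simp only [filler_paragraph_py, filler_paragraph_py_alt]
  apply assemble_congr
  -- the two word lists coincide
  have hlen : fillerLex.length = 40 := by rfl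
  rw [hlen]
  -- the start offset
  set s := PySem.Int.mod (idx * 7) ((40 : Nat) : Int) with hs
  have hs0 : 0 ≤ s := PySem.Int.mod_nonneg _ (by norm_num)
  have hs40 : s < 40 := by
    have := PySem.Int.mod_lt (a := idx * 7) (b := ((40 : Nat) : Int)) (by norm_num)
    exact_mod_cast this
  set m := s.toNat with hm
  have hsm : s = (m : Int) := by omega
  have hm40 : m < 40 := by omega
  -- the rotated list
  have hrot : PySem.List.slice fillerLex (some s) none ++ PySem.List.slice fillerLex none (some s)
      = fillerLex.drop m ++ fillerLex.take m := by
    rw [hsm]; simp [PySem.List.slice_from, PySem.List.slice_to]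
  rw [hrot]
  set rot := fillerLex.drop m ++ fillerLex.take m with hrotdef
  have hrotlen : rot.length = 40 := by
    rw [hrotdef, List.length_append, List.length_drop, List.length_take, hlen]; omega
  rw [hrotlen]
  -- the word count
  set nN := extra_words.toNat with hnN
  have hmax : max extra_words 0 = (nN : Int) := by omega
  rw [hmax]
  -- the number of tiles
  set q := -(PySem.Int.floordiv (-((nN : Nat) : Int)) ((40 : Nat) : Int)) with hq
  have hqb : ((q - 1) * 40 < (nN : Int) ∧ (nN : Int) ≤ q * 40) := by
    have h40 : (0 : Int) < ((40 : Nat) : Int) := by norm_num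
    have := (PySem.Int.neg_floordiv_neg_eq_iff_of_pos
      (a := ((nN : Nat) : Int)) (b := ((40 : Nat) : Int)) (q := q) h40).mp rfl
    exact_mod_cast this
  have hcount : nN ≤ q.toNat * 40 := by
    rcases hqb with ⟨h1, h2⟩; omega
  -- B's word list in range-map normal form
  rw [show PySem.List.slice ((List.replicate q.toNat rot).flatten) none (some ((nN : Nat) : Int))
        = ((List.replicate q.toNat rot).flatten).take nN from by
      simp [PySem.List.slice_to]]
  rw [tile_take rot q.toNat nN (by rw [hrotlen]; exact hcount)]
  -- A's word list in range-map normal form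
  by_cases hneg : extra_words ≤ 0
  · have hn0 : nN = 0 := by omega
    have hempty : PySem.List.pyRange 0 extra_words 1 = [] := by
      simp [pysem, PySem.List.pyRange, hneg]
    rw [hempty, hn0]
    simp
  · have hcast : extra_words = ((nN : Nat) : Int) := by omega
    rw [hcast, PySem.List.pyRange_zero_natCast,
        PySem.List.foldl_append_singleton_eq_map, List.map_map]
    apply List.map_congr_left
    intro i hi
    simp only [Function.comp]
    -- the index arithmetic: (idx*7 + i) mod 40 = (m + i) % 40 as a Nat cast
    have hmod : PySem.Int.mod (idx * 7 + (i : Int)) ((40 : Nat) : Int) = (((m + i) % 40 : Nat) : Int) := by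
      rw [PySem.Int.mod_eq_emod_of_pos (by norm_num)]
      have hsval : s = (idx * 7) % ((40 : Nat) : Int) :=
        PySem.Int.mod_eq_emod_of_pos (by norm_num)
      push_cast at *
      omega
    rw [hmod, PySem.List.pyGetD_natCast]
    have hrl : (List.drop m fillerLex ++ List.take m fillerLex).length = fillerLex.length := by
      rw [List.length_append, List.length_drop, List.length_take]; omega
    rw [hrotdef, hrl, ← hlen]
    exact (rot_getD fillerLex m i hm40).symm
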